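-- pv_equiv track=rewrite | github.com/yena2bell/net_analyzer | network/network_generation.py | check_modality_condition
-- ===== SOURCE A (Python) =====
-- def check_modality_condition(i_Booleantable, dic_predecessor_b_modality, l_order_of_input):
--     """dic_i_predecessor_b_modality {i, True or false}
--     if j th node is checked, i->j should be activation if dic_i_predecessor_b_modality[i] == True
--     i->j should be suppression if dic_i_predecessor_b_modality[i] == False"""
--     i_numinteraction = len(l_order_of_input)
--     i_numtableline = pow(2,i_numinteraction)
--     b_flag_modality_satisfying_logic = True
--     for i in range(i_numinteraction):
--         j = 0
--         i_interval = pow(2,i)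
--         k = j+i_interval
--         b_flag_modality_satisfying_interaction = True
--         while k < i_numtableline and b_flag_modality_satisfying_interaction:
--             b_jthline = (i_Booleantable>>j)%2#l_order_of_input[i_numinteraction-i-1] has value 0
--             b_kthline = (i_Booleantable>>k)%2#l_order_of_input[i_numinteraction-i-1] has value 1
--             if dic_predecessor_b_modality[l_order_of_input[i_numinteraction-i-1]]: #True: activation
--                 if b_jthline and not b_kthline:
--                     b_flag_modality_satisfying_interaction = False
--             else:#b_modality == False: inhibition
--                 if b_kthline and not b_jthline:
--                     b_flag_modality_satisfying_interaction = False
--             if (k+1) % pow(2,i+1) == 0: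
--                 j = k+1
--                 k = j+i_interval
--             else:
--                 j += 1
--                 k += 1
--         #if ith interaction have meaning, then b_flag_meaningless_interacion == False
--         b_flag_modality_satisfying_logic = b_flag_modality_satisfying_logic and b_flag_modality_satisfying_interaction
--
--     return b_flag_modality_satisfying_logic
-- ===== SOURCE B (Python) =====
-- def check_modality_condition(i_Booleantable, dic_predecessor_b_modality, l_order_of_input):
--     """Bit-parallel check: for each input variable, one whole-table bitmask
--     test replaces A's row-by-row two-pointer scan of the truth table."""
--     n = len(l_order_of_input)
--     num = 1 << n
--     full = (1 << num) - 1
--     table = i_Booleantable % (1 << num)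
--     ok = True
--     for i in range(n):
--         step = 1 << i
--         block = (1 << step) - 1
--         low = 0
--         pos = 0
--         while pos < num:
--             low |= block << pos
--             pos += 2 * step
--         if dic_predecessor_b_modality[l_order_of_input[n - i - 1]]:
--             bad = table & ((table >> step) ^ full) & low
--         else:
--             bad = (table >> step) & (table ^ full) & low
--         ok = ok and bad == 0
--     return ok
-- ===== Notes on version B (the rewrite author's own statement) =====
-- stated objective: alternative
-- what changed: A scans the truth table row by row with one two-pointer while-loop per input variable; B tests each variable's monotonicity with a single bit-parallel mask computation (bad = table & ~(table>>2^i) restricted by a mask to the rows with bit i clear, compared against 0), so no per-row loop over the table remains.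
import Mathlib
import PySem

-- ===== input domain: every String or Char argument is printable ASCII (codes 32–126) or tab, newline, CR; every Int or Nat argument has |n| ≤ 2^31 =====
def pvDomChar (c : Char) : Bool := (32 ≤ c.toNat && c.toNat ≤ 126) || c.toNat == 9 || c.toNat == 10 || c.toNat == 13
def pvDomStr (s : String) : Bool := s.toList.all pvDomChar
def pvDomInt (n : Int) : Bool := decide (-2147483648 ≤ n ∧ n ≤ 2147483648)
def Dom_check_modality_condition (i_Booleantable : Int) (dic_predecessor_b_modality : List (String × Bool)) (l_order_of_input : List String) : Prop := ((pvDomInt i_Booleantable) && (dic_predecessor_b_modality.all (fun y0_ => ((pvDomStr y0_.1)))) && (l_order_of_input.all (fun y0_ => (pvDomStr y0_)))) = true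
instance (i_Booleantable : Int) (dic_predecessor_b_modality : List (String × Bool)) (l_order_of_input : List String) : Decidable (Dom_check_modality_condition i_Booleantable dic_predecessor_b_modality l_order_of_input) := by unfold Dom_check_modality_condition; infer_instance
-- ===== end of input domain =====

-- B replaces A's per-variable row-by-row two-pointer scans by one bitmask test per variable
-- over the whole truth table (objective: alternative algorithm, same exact result).

-- ===== PORT A =====
-- A's inner `while k < i_numtableline and b_flag…` loop for variable i (two-pointer scan;
-- `i_interval` is 2^i, the dict lookup happens inside the loop exactly as in A).
def pvAInner (i_Booleantable : Int) (dic_predecessor_b_modality : List (String × Bool))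
    (l_order_of_input : List String) (n N i i_interval j k : Nat) (flag : Bool) : Bool :=
  if h : k < N ∧ flag = true then
    let b_jthline := PySem.Int.mod (i_Booleantable >>> j) 2
    let b_kthline := PySem.Int.mod (i_Booleantable >>> k) 2
    let m := PySem.Dict.getD (PySem.Dict.ofList dic_predecessor_b_modality)
      ((PySem.List.pyGet? l_order_of_input ((n : Int) - (i : Int) - 1)).getD "") false
    let flag' := if m then (if b_jthline ≠ 0 ∧ b_kthline = 0 then false else flag)
                 else (if b_kthline ≠ 0 ∧ b_jthline = 0 then false else flag)
    if (k + 1) % 2 ^ (i + 1) = 0 then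
      pvAInner i_Booleantable dic_predecessor_b_modality l_order_of_input n N i i_interval (k + 1) (k + 1 + i_interval) flag'
    else
      pvAInner i_Booleantable dic_predecessor_b_modality l_order_of_input n N i i_interval (j + 1) (k + 1) flag'
  else flag
termination_by N - k
decreasing_by all_goals omega

def check_modality_condition (i_Booleantable : Int) (dic_predecessor_b_modality : List (String × Bool)) (l_order_of_input : List String) : Bool :=
  let i_numinteraction := l_order_of_input.length
  let i_numtableline := 2 ^ i_numinteraction
  (List.range i_numinteraction).foldl
    (fun b_flag_modality_satisfying_logic i =>
      b_flag_modality_satisfying_logic &&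
        pvAInner i_Booleantable dic_predecessor_b_modality l_order_of_input
          i_numinteraction i_numtableline i (2 ^ i) 0 (0 + 2 ^ i) true)
    true

-- ===== PORT B =====
-- Source B's `while pos < num: low |= block << pos; pos += 2*step` (step = 1 << i).
def pvMaskLoop (num : Nat) (block : Int) (i : Nat) (pos : Nat) (low : Int) : Int :=
  if pos < num then
    pvMaskLoop num block i (pos + 2 * 2 ^ i) (PySem.Int.bor low (block <<< pos))
  else low
termination_by num - pos
decreasing_by have := Nat.two_pow_pos i; omega

def check_modality_condition_alt (i_Booleantable : Int) (dic_predecessor_b_modality : List (String × Bool)) (l_order_of_input : List String) : Bool :=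
  let n := l_order_of_input.length
  let num := 1 <<< n
  let full : Int := (1 <<< num : Int) - 1
  let table := PySem.Int.mod i_Booleantable (1 <<< num : Int)
  (List.range n).foldl
    (fun ok i =>
      let step := 1 <<< i
      let block : Int := (1 <<< step : Int) - 1
      let low := pvMaskLoop num block i 0 0
      let bad :=
        if PySem.Dict.getD (PySem.Dict.ofList dic_predecessor_b_modality)
            ((PySem.List.pyGet? l_order_of_input ((n : Int) - (i : Int) - 1)).getD "") false
        then PySem.Int.band (PySem.Int.band table (PySem.Int.bxor (table >>> step) full)) low
        else PySem.Int.band (PySem.Int.band (table >>> step) (PySem.Int.bxor table full)) low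
      ok && decide (bad = 0))
    true

-- ===== PRECONDITION & SPEC =====
-- Pre_ excludes exactly the inputs on which A raises KeyError: some input-variable name of
-- l_order_of_input is missing from the dict (A looks every listed variable up).
def Pre_check_modality_condition (i_Booleantable : Int) (dic_predecessor_b_modality : List (String × Bool)) (l_order_of_input : List String) : Prop :=
  ∀ s ∈ l_order_of_input, ((PySem.Dict.ofList dic_predecessor_b_modality).get? s).isSome
instance (i_Booleantable : Int) (dic_predecessor_b_modality : List (String × Bool)) (l_order_of_input : List String) : Decidable (Pre_check_modality_condition i_Booleantable dic_predecessor_b_modality l_order_of_input) := by unfold Pre_check_modality_condition; infer_instance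

def pvWitness_check_modality_condition : Int × (List (String × Bool)) × List String :=
  (6, [("a", true), ("b", false)], ["a", "b"])

def Spec_check_modality_condition (i_Booleantable : Int) (dic_predecessor_b_modality : List (String × Bool)) (l_order_of_input : List String) (out : Bool) : Prop := out = check_modality_condition_alt i_Booleantable dic_predecessor_b_modality l_order_of_input
instance (i_Booleantable : Int) (dic_predecessor_b_modality : List (String × Bool)) (l_order_of_input : List String) (out : Bool) : Decidable (Spec_check_modality_condition i_Booleantable dic_predecessor_b_modality l_order_of_input out) := by unfold Spec_check_modality_condition; infer_instance

-- ===== CLAIM (what is proved, stated in full; the proofs are below) =====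
def Claim_equal_check_modality_condition : Prop := ∀ (i_Booleantable : Int) (dic_predecessor_b_modality : List (String × Bool)) (l_order_of_input : List String), Dom_check_modality_condition i_Booleantable dic_predecessor_b_modality l_order_of_input → Pre_check_modality_condition i_Booleantable dic_predecessor_b_modality l_order_of_input → Spec_check_modality_condition i_Booleantable dic_predecessor_b_modality l_order_of_input (check_modality_condition i_Booleantable dic_predecessor_b_modality l_order_of_input)

-- ===== LEMMAS AND PROOFS =====

-- bit j of the (possibly negative) table, as the Int 0 or 1
def pvBit (t : Int) (j : Nat) : Int := PySem.Int.mod (t >>> j) 2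
-- the modality read for variable i by both programs
def pvMod (dic : List (String × Bool)) (order : List String) (n i : Nat) : Bool :=
  PySem.Dict.getD (PySem.Dict.ofList dic)
    ((PySem.List.pyGet? order ((n : Int) - (i : Int) - 1)).getD "") false
-- violation of the modality condition at hypercube edge (j, j + 2^i)
def pvViol (t : Int) (m : Bool) (i j : Nat) : Bool :=
  if m then decide (pvBit t j ≠ 0 ∧ pvBit t (j + 2 ^ i) = 0)
  else decide (pvBit t (j + 2 ^ i) ≠ 0 ∧ pvBit t j = 0)
-- no violation for variable i among rows below M
def pvOk (t : Int) (m : Bool) (i M : Nat) : Bool :=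
  decide (∀ j, j < M → j / 2 ^ i % 2 = 0 → pvViol t m i j = false)

lemma pvDivModTwo (A q s : Nat) (hA : 0 < A) : (q * (2 * A) + s) / A % 2 = s / A % 2 := by
  have h1 : q * (2 * A) + s = s + A * (2 * q) := by ring
  rw [h1, Nat.add_mul_div_left _ _ hA, Nat.add_mul_mod_self_left]

lemma pvClear_low (i q r : Nat) (hr : r < 2 ^ i) : (q * 2 ^ (i + 1) + r) / 2 ^ i % 2 = 0 := by
  have h2 : (2 : Nat) ^ (i + 1) = 2 * 2 ^ i := by rw [pow_succ]; ring
  rw [h2, pvDivModTwo _ _ _ (Nat.two_pow_pos i), Nat.div_eq_of_lt hr]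

lemma pvClear_high (i q s : Nat) (h1 : 2 ^ i ≤ s) (h2 : s < 2 ^ (i + 1)) :
    ¬ (q * 2 ^ (i + 1) + s) / 2 ^ i % 2 = 0 := by
  have h3 : (2 : Nat) ^ (i + 1) = 2 * 2 ^ i := by rw [pow_succ]; ring
  rw [h3, pvDivModTwo _ _ _ (Nat.two_pow_pos i)]
  have : s / 2 ^ i = 1 := by
    apply Nat.div_eq_of_lt_le (by simpa using h1)
    rw [h3] at h2; omega
  simp [this]

lemma pvAInner_false (t : Int) (dic : List (String × Bool)) (order : List String)
    (n N i iv j k : Nat) : pvAInner t dic order n N i iv j k false = false := by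
  rw [pvAInner]; simp

lemma pvFlagStep (m : Bool) (x y : Int) :
    (if m then (if x ≠ 0 ∧ y = 0 then false else true)
     else (if y ≠ 0 ∧ x = 0 then false else true))
    = !(if m then decide (x ≠ 0 ∧ y = 0) else decide (y ≠ 0 ∧ x = 0)) := by
  cases m <;> split_ifs <;> simp_all <;> tauto

lemma pvAInner_eq (t : Int) (dic : List (String × Bool)) (order : List String)
    (n i : Nat) (hin : i < n) :
    ∀ (d j q r : Nat), 2 ^ n - j ≤ d → r < 2 ^ i → j = q * 2 ^ (i + 1) + r →
      pvAInner t dic order n (2 ^ n) i (2 ^ i) j (j + 2 ^ i) true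
        = decide (∀ j', j ≤ j' → j' < 2 ^ n → j' / 2 ^ i % 2 = 0 →
            pvViol t (pvMod dic order n i) i j' = false) := by
  intro d
  induction d with
  | zero =>
    intro j q r hd hr hj
    rw [pvAInner, dif_neg (fun h => absurd h.1 (by omega))]
    symm; rw [decide_eq_true_iff]
    intro j' h1 h2 h3; exact absurd h2 (by omega)
  | succ d ih =>
    intro j q r hd hr hj
    by_cases hjN : j < 2 ^ n
    case neg =>
      rw [pvAInner, dif_neg (fun h => absurd h.1 (by omega))]
      symm; rw [decide_eq_true_iff]
      intro j' h1 h2 h3; exact absurd h2 (by omega)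
    case pos =>
      have hA : 0 < 2 ^ i := Nat.two_pow_pos i
      have hB2 : (2 : Nat) ^ (i + 1) = 2 * 2 ^ i := by rw [pow_succ]; ring
      obtain ⟨Q, hQ⟩ : 2 ^ (i + 1) ∣ 2 ^ n := pow_dvd_pow 2 (by omega)
      have hqQ : q < Q := by
        have h1 : 2 ^ (i + 1) * q < 2 ^ (i + 1) * Q := by
          rw [mul_comm (2 ^ (i + 1)) q]; omega
        exact Nat.lt_of_mul_lt_mul_left h1
      have hmul : (q + 1) * 2 ^ (i + 1) ≤ Q * 2 ^ (i + 1) := Nat.mul_le_mul_right _ hqQ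
      have hq1 : (q + 1) * 2 ^ (i + 1) = q * 2 ^ (i + 1) + 2 ^ (i + 1) := by ring
      have hQB : Q * 2 ^ (i + 1) = 2 ^ n := by rw [mul_comm, ← hQ]
      have hkN : j + 2 ^ i < 2 ^ n := by omega
      have hclearj : j / 2 ^ i % 2 = 0 := hj ▸ pvClear_low i q r hr
      rw [pvAInner, dif_pos ⟨hkN, rfl⟩]
      simp only []
      rw [pvFlagStep]
      have hmv : (!(if PySem.Dict.getD (PySem.Dict.ofList dic)
            ((PySem.List.pyGet? order ((n : Int) - (i : Int) - 1)).getD "") false = true then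
            decide (PySem.Int.mod (t >>> j) 2 ≠ 0 ∧ PySem.Int.mod (t >>> (j + 2 ^ i)) 2 = 0)
          else
            decide (PySem.Int.mod (t >>> (j + 2 ^ i)) 2 ≠ 0 ∧ PySem.Int.mod (t >>> j) 2 = 0)))
          = !pvViol t (pvMod dic order n i) i j := rfl
      rw [hmv]
      cases hv : pvViol t (pvMod dic order n i) i j with
      | true =>
        simp only [Bool.not_true]
        have hfalse : ∀ j0 k0, pvAInner t dic order n (2 ^ n) i (2 ^ i) j0 k0 false
            = decide (∀ j', j ≤ j' → j' < 2 ^ n → j' / 2 ^ i % 2 = 0 →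
                pvViol t (pvMod dic order n i) i j' = false) := by
          intro j0 k0
          rw [pvAInner_false]
          symm; rw [decide_eq_false_iff_not]
          intro hall
          have := hall j le_rfl hjN hclearj
          rw [this] at hv; exact Bool.false_ne_true hv
        split <;> apply hfalse
      | false =>
        simp only [Bool.not_false]
        by_cases hbr : (j + 2 ^ i + 1) % 2 ^ (i + 1) = 0
        · rw [if_pos hbr]
          have hmod : (j + 2 ^ i + 1) % 2 ^ (i + 1) = (r + 2 ^ i + 1) % 2 ^ (i + 1) := by
            rw [hj]
            have h5 : q * 2 ^ (i + 1) + r + 2 ^ i + 1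
                = 2 ^ (i + 1) * q + (r + 2 ^ i + 1) := by ring
            rw [h5, Nat.mul_add_mod]
          have hdvd : 2 ^ (i + 1) ∣ (r + 2 ^ i + 1) :=
            Nat.dvd_of_mod_eq_zero (hmod ▸ hbr)
          have hle := Nat.le_of_dvd (by omega) hdvd
          have hr' : r = 2 ^ i - 1 := by omega
          have hshape : j + 2 ^ i + 1 = (q + 1) * 2 ^ (i + 1) + 0 := by omega
          rw [show j + 2 ^ i + 1 + 2 ^ i = (j + 2 ^ i + 1) + 2 ^ i from rfl,
            ih (j + 2 ^ i + 1) (q + 1) 0 (by omega) (by omega) hshape]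
          rw [decide_eq_decide]
          constructor
          · intro h j' hj1 hj2 hj3
            rcases Nat.lt_or_ge j' (j + 2 ^ i + 1) with hlt | hge
            · rcases Nat.eq_or_lt_of_le hj1 with heq | hgt
              · exact heq ▸ hv
              · exfalso
                have hval : j' = q * 2 ^ (i + 1) + (j' - q * 2 ^ (i + 1)) := by omega
                exact pvClear_high i q (j' - q * 2 ^ (i + 1)) (by omega) (by omega)
                  (hval ▸ hj3)
            · exact h j' hge hj2 hj3
          · intro h j' hj1 hj2 hj3
            exact h j' (by omega) hj2 hj3
        · rw [if_neg hbr]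
          have hr1 : r + 1 < 2 ^ i := by
            rcases Nat.lt_or_ge (r + 1) (2 ^ i) with h | h
            · exact h
            · exfalso
              apply hbr
              rw [hj, show q * 2 ^ (i + 1) + r + 2 ^ i + 1 = (q + 1) * 2 ^ (i + 1) from by omega]
              exact Nat.mul_mod_left _ _
          have hshape : j + 1 = q * 2 ^ (i + 1) + (r + 1) := by omega
          rw [show j + 2 ^ i + 1 = (j + 1) + 2 ^ i from by omega,
            ih (j + 1) q (r + 1) (by omega) hr1 hshape]
          rw [decide_eq_decide]
          constructor
          · intro h j' hj1 hj2 hj3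
            rcases Nat.eq_or_lt_of_le hj1 with heq | hgt
            · exact heq ▸ hv
            · exact h j' (by omega) hj2 hj3
          · intro h j' hj1 hj2 hj3
            exact h j' (by omega) hj2 hj3

lemma pv_all_mem_congr {f g : Nat → Bool} : ∀ {l : List Nat},
    (∀ x ∈ l, f x = g x) → l.all f = l.all g := by
  intro l
  induction l with
  | nil => intro _; rfl
  | cons x xs ih =>
    intro h
    simp only [List.all_cons, h x (by simp), ih fun y hy => h y (by simp [hy])]

lemma pv_foldl_and (g : Nat → Bool) : ∀ (l : List Nat) (a : Bool),
    l.foldl (fun acc i => acc && g i) a = (a && l.all g) := by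
  intro l
  induction l with
  | nil => simp
  | cons x xs ih => intro a; simp [ih, Bool.and_assoc]

lemma pvA_eq (t : Int) (dic : List (String × Bool)) (order : List String) :
    check_modality_condition t dic order
      = (List.range order.length).all
          (fun i => pvOk t (pvMod dic order order.length i) i (2 ^ order.length)) := by
  unfold check_modality_condition
  simp only []
  rw [pv_foldl_and, Bool.true_and]
  apply pv_all_mem_congr
  intro i hi
  have hin : i < order.length := List.mem_range.mp hi
  rw [pvAInner_eq t dic order order.length i hin (2 ^ order.length) 0 0 0 (Nat.sub_le _ _)
    (Nat.two_pow_pos i) (by simp)]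
  unfold pvOk
  rw [decide_eq_decide]
  exact ⟨fun h j hj hc => h j (Nat.zero_le _) hj hc, fun h j _ hj hc => h j hj hc⟩

-- ---------- B side ----------

-- Nat-level twin of the Int mask loop (proof device)
def pvMaskLoopN (num blockN i pos lowN : Nat) : Nat :=
  if pos < num then
    pvMaskLoopN num blockN i (pos + 2 * 2 ^ i) (lowN ||| (blockN <<< pos))
  else lowN
termination_by num - pos
decreasing_by have := Nat.two_pow_pos i; omega

lemma pvMaskLoop_cast (num : Nat) (b : Nat) (i : Nat) : ∀ (d pos l : Nat),
    num - pos ≤ d →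
    pvMaskLoop num (b : Int) i pos (l : Int) = ((pvMaskLoopN num b i pos l : Nat) : Int) := by
  intro d
  induction d with
  | zero =>
    intro pos l hd
    rw [pvMaskLoop, pvMaskLoopN, if_neg (by omega), if_neg (by omega)]
  | succ d ih =>
    intro pos l hd
    rw [pvMaskLoop, pvMaskLoopN]
    by_cases h : pos < num
    · rw [if_pos h, if_pos h]
      have hcast : PySem.Int.bor (l : Int) ((b : Int) <<< pos) = ((l ||| (b <<< pos) : Nat) : Int) := by
        rw [show ((b : Int) <<< pos) = ((b <<< pos : Nat) : Int) by
          simp [Int.shiftLeft_eq, Nat.shiftLeft_eq]]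
        exact PySem.Int.bor_natCast ..
      rw [hcast]
      exact ih _ _ (by have := Nat.two_pow_pos i; omega)
    · rw [if_neg h, if_neg h]

lemma pvMaskLoopN_testBit (num i : Nat) (hdvd : 2 ^ (i + 1) ∣ num) : ∀ (d pos l : Nat),
    num - pos ≤ d → pos % 2 ^ (i + 1) = 0 →
    ∀ j, (pvMaskLoopN num (2 ^ 2 ^ i - 1) i pos l).testBit j
      = (l.testBit j || decide (pos ≤ j ∧ j < num ∧ j / 2 ^ i % 2 = 0)) := by
  intro d
  induction d with
  | zero =>
    intro pos l hd hmod j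
    rw [pvMaskLoopN, if_neg (by omega)]
    have : ¬ (pos ≤ j ∧ j < num ∧ j / 2 ^ i % 2 = 0) := by rintro ⟨h1, h2, _⟩; omega
    simp [this]
  | succ d ih =>
    intro pos l hd hmod j
    rw [pvMaskLoopN]
    by_cases h : pos < num
    · rw [if_pos h]
      have hB2 : (2 : Nat) ^ (i + 1) = 2 * 2 ^ i := by rw [pow_succ]; ring
      have hA : 0 < 2 ^ i := Nat.two_pow_pos i
      obtain ⟨Q, hQ⟩ := hdvd
      obtain ⟨q, hq⟩ := Nat.dvd_of_mod_eq_zero hmod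
      have hx1 : 2 ^ (i + 1) * (q + 1) = 2 ^ (i + 1) * q + 2 ^ (i + 1) := by ring
      have hqQ : q < Q := by
        by_contra hc
        have := Nat.mul_le_mul_left (2 ^ (i + 1)) (not_lt.mp hc)
        omega
      have hx2 : 2 ^ (i + 1) * (q + 1) ≤ 2 ^ (i + 1) * Q := Nat.mul_le_mul_left _ (by omega)
      have hposB : pos + 2 ^ (i + 1) ≤ num := by omega
      have hmod' : (pos + 2 * 2 ^ i) % 2 ^ (i + 1) = 0 := by
        rw [show pos + 2 * 2 ^ i = 2 ^ (i + 1) * (q + 1) by omega]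
        exact Nat.mul_mod_right _ _
      have hcomm : q * 2 ^ (i + 1) = pos := by rw [mul_comm]; exact hq.symm
      rw [ih _ _ (by omega) hmod' j]
      have hsh : ((2 ^ 2 ^ i - 1) <<< pos).testBit j
          = (decide (pos ≤ j) && decide (j - pos < 2 ^ i)) := by
        rw [Nat.testBit_shiftLeft, Nat.testBit_two_pow_sub_one]
      rw [Nat.testBit_lor, hsh, Bool.or_assoc]
      have hiff : ((decide (pos ≤ j) && decide (j - pos < 2 ^ i)) ||
          decide (pos + 2 * 2 ^ i ≤ j ∧ j < num ∧ j / 2 ^ i % 2 = 0))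
          = decide (pos ≤ j ∧ j < num ∧ j / 2 ^ i % 2 = 0) := by
        by_cases hpj : pos ≤ j
        · by_cases hjlt : j < pos + 2 ^ (i + 1)
          · have hclear_iff : j / 2 ^ i % 2 = 0 ↔ j - pos < 2 ^ i := by
              constructor
              · intro hc
                by_contra hge2
                exact pvClear_high i q (j - pos) (by omega) (by omega)
                  (by rw [show q * 2 ^ (i + 1) + (j - pos) = j by omega]; exact hc)
              · intro hlt2
                have := pvClear_low i q (j - pos) hlt2
                rwa [show q * 2 ^ (i + 1) + (j - pos) = j by omega] at this
            by_cases hcl : j / 2 ^ i % 2 = 0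
            · have hjnum : j < num := by omega
              have h1 : j - pos < 2 ^ i := hclear_iff.mp hcl
              simp [hpj, h1, hjnum, hcl]
            · have h1 : ¬ (j - pos < 2 ^ i) := fun hh => hcl (hclear_iff.mpr hh)
              have h2 : ¬ (pos + 2 * 2 ^ i ≤ j) := by omega
              simp [h1, h2, hcl]
          · have h1 : ¬ (j - pos < 2 ^ i) := by omega
            have h2 : pos + 2 * 2 ^ i ≤ j := by omega
            simp [h1, h2, hpj]
        · have h2 : ¬ (pos + 2 * 2 ^ i ≤ j) := by omega
          simp [hpj, h2]
      rw [hiff]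
    · rw [if_neg h]
      have : ¬ (pos ≤ j ∧ j < num ∧ j / 2 ^ i % 2 = 0) := by rintro ⟨h1, h2, _⟩; omega
      simp [this]

-- bit-extraction bridge: bit j of the truncated table = Python's (t >> j) % 2 test
lemma pvBit_testBit (t : Int) (num j : Nat) (hj : j < num) :
    ((PySem.Int.mod t (2 ^ num : Int)).toNat).testBit j = decide (pvBit t j ≠ 0) := by
  have hpos : (0 : Int) < 2 ^ num := by positivity
  have hmodE : PySem.Int.mod t (2 ^ num : Int) = t % (2 ^ num : Int) := by
    rw [PySem.Int.mod, Int.fmod_eq_emod_of_nonneg]; positivity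
  set q' : Int := t / (2 ^ num : Int) with hq'
  set r : Int := t % (2 ^ num : Int) with hr
  have hr0 : 0 ≤ r := Int.emod_nonneg t (by positivity)
  have hrlt : r < 2 ^ num := Int.emod_lt_of_pos t hpos
  have hdecomp : t = 2 ^ num * q' + r := (Int.ediv_add_emod t (2 ^ num)).symm
  -- pvBit t j = r / 2^j % 2
  have hbit : pvBit t j = r / (2 ^ j : Int) % 2 := by
    have hsd : pvBit t j = (t / (2 ^ j : Int)) % 2 := by
      rw [pvBit, PySem.Int.mod, Int.shiftRight_eq_div_pow, Int.fmod_eq_emod_of_nonneg]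
      · norm_num
      · omega
    rw [hsd]
    have hsplit : t / (2 ^ j : Int) = 2 ^ (num - j - 1) * q' * 2 + r / 2 ^ j := by
      conv_lhs => rw [hdecomp]
      have hpow : (2 : Int) ^ num * q' = (2 ^ (num - j - 1) * q' * 2) * 2 ^ j := by
        rw [show (2 : Int) ^ (num - j - 1) * q' * 2 * 2 ^ j = 2 ^ (num - j - 1) * 2 ^ j * 2 * q' by ring,
          ← pow_add, show num - j - 1 + j = num - 1 by omega]
        rw [show (2 : Int) ^ (num - 1) * 2 = 2 ^ (num - 1) * 2 ^ 1 by norm_num, ← pow_add,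
          show num - 1 + 1 = num by omega]
      rw [hpow, show (2 : Int) ^ (num - j - 1) * q' * 2 * 2 ^ j + r
          = r + (2 ^ (num - j - 1) * q' * 2) * 2 ^ j by ring,
        Int.add_mul_ediv_right _ _ (by positivity : (2 : Int) ^ j ≠ 0)]
      ring
    rw [hsplit, show (2 : Int) ^ (num - j - 1) * q' * 2 + r / 2 ^ j
        = r / 2 ^ j + 2 * (2 ^ (num - j - 1) * q') by ring,
      Int.add_mul_emod_self_left]
  -- move to Nat
  have hrT : r = ((r.toNat : Int)) := (Int.toNat_of_nonneg hr0).symm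
  rw [hmodE, Nat.testBit_eq_decide_div_mod_eq]
  have hcast : r / (2 ^ j : Int) % 2 = ((r.toNat / 2 ^ j % 2 : Nat) : Int) := by
    rw [hrT]
    push_cast
    rfl
  rw [decide_eq_decide, hbit, hcast]
  have hlt2 : r.toNat / 2 ^ j % 2 < 2 := Nat.mod_lt _ (by omega)
  constructor
  · intro h
    omega
  · intro h
    omega

-- if row j (< 2^n) has bit i clear (i < n) then its partner j + 2^i is still < 2^n
lemma pvPartner_lt (n i j : Nat) (hin : i < n) (hj : j < 2 ^ n) (hc : j / 2 ^ i % 2 = 0) :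
    j + 2 ^ i < 2 ^ n := by
  have hB2 : (2 : Nat) ^ (i + 1) = 2 * 2 ^ i := by rw [pow_succ]; ring
  obtain ⟨Q, hQ⟩ : 2 ^ (i + 1) ∣ 2 ^ n := pow_dvd_pow 2 (by omega)
  obtain ⟨q, s, hjs, hslt⟩ : ∃ q s, j = q * 2 ^ (i + 1) + s ∧ s < 2 ^ (i + 1) :=
    ⟨j / 2 ^ (i + 1), j % 2 ^ (i + 1),
      by rw [mul_comm]; exact (Nat.div_add_mod j _).symm, Nat.mod_lt _ (by positivity)⟩
  have hs : s < 2 ^ i := by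
    by_contra hge
    exact pvClear_high i q s (by omega) hslt (hjs ▸ hc)
  have h2 : Q * 2 ^ (i + 1) = 2 ^ n := by rw [mul_comm, ← hQ]
  have hqQ : q < Q := by
    by_contra hcq
    have h1 := Nat.mul_le_mul_right (2 ^ (i + 1)) (not_lt.mp hcq)
    omega
  have h3 : (q + 1) * 2 ^ (i + 1) = q * 2 ^ (i + 1) + 2 ^ (i + 1) := by ring
  have h4 : (q + 1) * 2 ^ (i + 1) ≤ Q * 2 ^ (i + 1) := Nat.mul_le_mul_right _ hqQ
  omega

lemma pvB_eq (t : Int) (dic : List (String × Bool)) (order : List String) :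
    check_modality_condition_alt t dic order
      = (List.range order.length).all
          (fun i => pvOk t (pvMod dic order order.length i) i (2 ^ order.length)) := by
  unfold check_modality_condition_alt
  simp only [Nat.one_shiftLeft]
  rw [pv_foldl_and, Bool.true_and]
  apply pv_all_mem_congr
  intro i hi
  set n := order.length with hn
  have hin : i < n := List.mem_range.mp hi
  obtain ⟨num, hnum⟩ : ∃ num, num = 2 ^ n := ⟨_, rfl⟩
  rw [← hnum]
  have hNpos : 0 < 2 ^ num := Nat.two_pow_pos num
  have hcastpow : ((2 ^ num : Nat) : Int) = (2 ^ num : Int) := by push_cast; rfl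
  have hcastpos : (0 : Int) < ((2 ^ num : Nat) : Int) := by exact_mod_cast hNpos
  set T : Nat := (PySem.Int.mod t (2 ^ num : Int)).toNat with hT
  have hTpos : 0 ≤ PySem.Int.mod t (2 ^ num : Int) := by
    rw [PySem.Int.mod]
    exact Int.fmod_nonneg_of_pos t (by positivity)
  have hTlt : T < 2 ^ num := by
    rw [hT]
    have h1 := Int.fmod_lt_of_pos t (show (0 : Int) < 2 ^ num by positivity)
    have h2 : (((2 ^ num : Nat) : Int)) = 2 ^ num := hcastpow
    rw [PySem.Int.mod]
    omega
  have htable : PySem.Int.mod t ((2 ^ num : Nat) : Int) = (T : Int) := by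
    rw [hcastpow, hT, Int.toNat_of_nonneg hTpos]
  -- cast of the shifted table
  have hshiftT : ((T : Int) >>> (2 ^ i : Nat)) = ((T >>> 2 ^ i : Nat) : Int) := by
    rw [Int.shiftRight_eq_div_pow, Nat.shiftRight_eq_div_pow]
    push_cast
    rfl
  -- cast of full
  have hfull : (((2 ^ num : Nat) : Int) - 1) = ((2 ^ num - 1 : Nat) : Int) := by
    push_cast [Nat.one_le_two_pow]
    ring
  -- cast of block and the mask
  have hblock : (((2 ^ 2 ^ i : Nat) : Int) - 1) = ((2 ^ 2 ^ i - 1 : Nat) : Int) := by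
    push_cast [Nat.one_le_two_pow]
    ring
  set L : Nat := pvMaskLoopN num (2 ^ 2 ^ i - 1) i 0 0 with hL
  have hmask : pvMaskLoop num (((2 ^ 2 ^ i : Nat) : Int) - 1) i 0 0 = (L : Int) := by
    rw [hblock, (show (0 : Int) = ((0 : Nat) : Int) from rfl),
      pvMaskLoop_cast num (2 ^ 2 ^ i - 1) i num 0 0 (Nat.sub_le _ _), hL]
  have hLbit : ∀ j, L.testBit j = decide (j < num ∧ j / 2 ^ i % 2 = 0) := by
    intro j
    rw [hL, pvMaskLoopN_testBit num i (by rw [hnum]; exact pow_dvd_pow 2 (by omega))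
      num 0 0 (Nat.sub_le _ _) (Nat.zero_mod _) j]
    simp [Nat.zero_testBit]
  -- name the modality
  set m := PySem.Dict.getD (PySem.Dict.ofList dic)
    ((PySem.List.pyGet? order ((n : Int) - (i : Int) - 1)).getD "") false with hm
  have hmEq : m = pvMod dic order n i := hm.trans rfl
  rw [← hmEq]
  have hbits : ∀ j, j < num → T.testBit j = decide (pvBit t j ≠ 0) :=
    fun j hj => pvBit_testBit t num j hj
  -- the Nat-level bad value for each branch
  have hbadT : PySem.Int.band (PySem.Int.band (T : Int)
        (PySem.Int.bxor ((T : Int) >>> (2 ^ i : Nat)) (((2 ^ num : Nat) : Int) - 1)))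
        ((L : Nat) : Int)
      = (((T &&& ((T >>> 2 ^ i) ^^^ (2 ^ num - 1)) &&& L : Nat)) : Int) := by
    rw [hshiftT, hfull, PySem.Int.bxor_natCast, PySem.Int.band_natCast, PySem.Int.band_natCast]
  have hbadF : PySem.Int.band (PySem.Int.band ((T : Int) >>> (2 ^ i : Nat))
        (PySem.Int.bxor (T : Int) (((2 ^ num : Nat) : Int) - 1)))
        ((L : Nat) : Int)
      = ((((T >>> 2 ^ i) &&& (T ^^^ (2 ^ num - 1)) &&& L : Nat)) : Int) := by
    rw [hshiftT, hfull, PySem.Int.bxor_natCast, PySem.Int.band_natCast, PySem.Int.band_natCast]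
  -- the branch-dependent edge test equals pvViol on in-range clear rows
  have hE : ∀ j, j < num → j / 2 ^ i % 2 = 0 →
      (if m = true then T.testBit j && !(T.testBit (j + 2 ^ i))
       else T.testBit (j + 2 ^ i) && !(T.testBit j)) = pvViol t m i j := by
    intro j hjn hcl
    have hk : j + 2 ^ i < 2 ^ n := pvPartner_lt n i j hin (by omega) hcl
    rw [hbits j hjn, hbits (j + 2 ^ i) (by omega)]
    by_cases hm2 : m = true <;> by_cases ha : pvBit t j = 0 <;>
      by_cases hb : pvBit t (j + 2 ^ i) = 0 <;>
      simp [pvViol, hm2, ha, hb]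
  -- characterize each branch's zero test
  have hchar : ∀ (X : Nat),
      (∀ j, X.testBit j = ((if m = true then T.testBit j && !(T.testBit (j + 2 ^ i))
                            else T.testBit (j + 2 ^ i) && !(T.testBit j))
                          && decide (j < num ∧ j / 2 ^ i % 2 = 0))) →
      decide (X = 0) = pvOk t m i num := by
    intro X hX
    rw [pvOk, decide_eq_decide]
    constructor
    · intro hz j hj hc
      have hbj := hX j
      rw [hz, Nat.zero_testBit] at hbj
      have hd : decide (j < num ∧ j / 2 ^ i % 2 = 0) = true := by simp [hj, hc]
      rw [hd, Bool.and_true] at hbj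
      rw [← hE j hj hc]
      exact hbj.symm
    · intro hv
      apply Nat.eq_of_testBit_eq
      intro j
      rw [Nat.zero_testBit, hX j]
      by_cases hjc : j < num ∧ j / 2 ^ i % 2 = 0
      · rw [hE j hjc.1 hjc.2, hv j hjc.1 hjc.2]
        simp
      · simp [hjc]
  have hzero : ∀ (X : Nat), decide ((X : Int) = 0) = decide (X = 0) := by
    intro X
    by_cases h : X = 0 <;> simp [h]
  rw [htable, hmask]
  by_cases hmv : m = true
  · rw [if_pos hmv, hbadT, hzero]
    apply hchar
    intro j
    rw [hmv, if_pos rfl]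
    rw [Nat.testBit_land, Nat.testBit_land, Nat.testBit_xor, Nat.testBit_shiftRight,
      Nat.testBit_two_pow_sub_one, hLbit j]
    by_cases hjn : j < num
    · by_cases hcl : j / 2 ^ i % 2 = 0
      · rw [show 2 ^ i + j = j + 2 ^ i by omega]
        cases h1 : T.testBit j <;> cases h2 : T.testBit (j + 2 ^ i) <;>
          simp [h1, h2, hjn, hcl]
      · simp [hjn, hcl]
    · simp [hjn]
  · rw [if_neg hmv, hbadF, hzero]
    apply hchar
    intro j
    rw [if_neg hmv]
    rw [Nat.testBit_land, Nat.testBit_land, Nat.testBit_xor, Nat.testBit_shiftRight,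
      Nat.testBit_two_pow_sub_one, hLbit j]
    by_cases hjn : j < num
    · by_cases hcl : j / 2 ^ i % 2 = 0
      · rw [show 2 ^ i + j = j + 2 ^ i by omega]
        cases h1 : T.testBit j <;> cases h2 : T.testBit (j + 2 ^ i) <;>
          simp [h1, h2, hjn, hcl]
      · simp [hjn, hcl]
    · simp [hjn]

-- ===== VERDICT (by name: the statement is the Claim_ definition above) =====
theorem check_modality_condition_spec : Claim_equal_check_modality_condition := by
  intro t dic order _ _
  unfold Spec_check_modality_condition
  rw [pvA_eq, pvB_eq]
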